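-- pv_equiv track=rewrite | github.com/dominiclet/Lawquiz | lawquiz.py | blank_maker
-- ===== SOURCE A (Python) =====
-- def blank_maker(word):
--     blanks = ""
--     for letter in word:
--         if letter == " ":
--             blanks += "  "
--         else:
--             blanks += "_ "
--     return blanks
-- ===== SOURCE B (Python) =====
-- def blank_maker(word):
--     return "  ".join("_ " * len(tok) for tok in word.split(" "))
-- ===== Notes on version B (the rewrite author's own statement) =====
-- stated objective: simpler
-- what changed: Replaced A's per-character branch-and-append loop by a one-liner: split on spaces, repeat the two-character blank once per letter of each token, and join the tokens with the blank that stands for a space.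
import Mathlib
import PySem

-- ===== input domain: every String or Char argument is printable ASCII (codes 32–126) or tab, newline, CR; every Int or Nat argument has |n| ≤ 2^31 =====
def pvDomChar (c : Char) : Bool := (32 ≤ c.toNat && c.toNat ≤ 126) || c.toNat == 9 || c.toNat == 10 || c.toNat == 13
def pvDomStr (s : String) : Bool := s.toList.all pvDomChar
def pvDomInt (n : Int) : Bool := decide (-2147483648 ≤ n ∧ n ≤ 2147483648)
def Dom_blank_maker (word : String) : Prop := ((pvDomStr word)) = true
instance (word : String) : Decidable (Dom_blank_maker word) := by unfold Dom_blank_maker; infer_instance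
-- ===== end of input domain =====

-- B replaces A's per-character branch loop by split-on-space / repeat-per-token / join (objective: simpler).

-- ===== PORT A =====
-- A: blanks = ""; for letter in word: blanks += "  " if letter == " " else "_ "; return blanks
def blank_maker (word : String) : String :=
  String.mk (word.toList.foldl
    (fun blanks letter => blanks ++ (if letter == ' ' then [' ', ' '] else ['_', ' '])) [])

-- ===== PORT B =====
-- hand port of word.split(" ") for the fixed one-character separator " ":
-- exact on all strings (Python: "".split(" ") == [""]; empty pieces kept for leading/trailing/double spaces).
def pvSplitSp : List Char → List (List Char)
  | [] => [[]]
  | c :: rest =>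
      match pvSplitSp rest, c == ' ' with
      | r, true => [] :: r
      | [], false => [[c]]          -- unreachable: pvSplitSp never returns []
      | h :: t, false => (c :: h) :: t

-- hand port of "  ".join(parts): exact for any list of pieces.
def pvJoinSp : List (List Char) → List Char
  | [] => []
  | [t] => t
  | t :: ts => t ++ [' ', ' '] ++ pvJoinSp ts

-- B: return "  ".join("_ " * len(tok) for tok in word.split(" "))
def blank_maker_alt (word : String) : String :=
  String.mk (pvJoinSp ((pvSplitSp word.toList).map
    (fun tok => (List.replicate tok.length ['_', ' ']).flatten)))

-- ===== PRECONDITION & SPEC =====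
def Spec_blank_maker (word : String) (out : String) : Prop := out = blank_maker_alt word
instance (word : String) (out : String) : Decidable (Spec_blank_maker word out) := by unfold Spec_blank_maker; infer_instance

-- ===== CLAIM (what is proved, stated in full; the proofs are below) =====
def Claim_equal_blank_maker : Prop := ∀ (word : String), Dom_blank_maker word → Spec_blank_maker word (blank_maker word)

-- ===== LEMMAS AND PROOFS =====

lemma pvSplitSp_ne_nil (l : List Char) : pvSplitSp l ≠ [] := by
  cases l with
  | nil => simp [pvSplitSp]
  | cons c rest =>
      simp only [pvSplitSp]
      rcases h : pvSplitSp rest with _ | ⟨hd, tl⟩ <;> cases hc : (c == ' ') <;> simp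

lemma pv_foldl_acc (l : List Char) (acc : List Char) :
    l.foldl (fun blanks letter => blanks ++ (if letter == ' ' then [' ', ' '] else ['_', ' '])) acc
    = acc ++ l.flatMap (fun letter => if letter == ' ' then [' ', ' '] else ['_', ' ']) := by
  induction l generalizing acc with
  | nil => simp
  | cons c rest ih =>
      simp only [List.foldl_cons, List.flatMap_cons]
      rw [ih]; simp [List.append_assoc]

lemma pv_key (l : List Char) :
    l.flatMap (fun letter => if letter == ' ' then [' ', ' '] else ['_', ' '])
    = pvJoinSp ((pvSplitSp l).map (fun tok => (List.replicate tok.length ['_', ' ']).flatten)) := by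
  induction l with
  | nil => simp [pvSplitSp, pvJoinSp]
  | cons c rest ih =>
      rcases h : pvSplitSp rest with _ | ⟨hd, tl⟩
      · exact absurd h (pvSplitSp_ne_nil rest)
      · by_cases hc : c = ' '
        · subst hc
          simp only [List.flatMap_cons, ih, h, pvSplitSp]
          cases tl <;> simp [pvJoinSp]
        · have hcb : (c == ' ') = false := by simpa using hc
          simp only [List.flatMap_cons, ih, h, pvSplitSp, hcb]
          cases tl <;> simp [pvJoinSp, List.replicate_succ]

-- ===== VERDICT (by name: the statement is the Claim_ definition above) =====
theorem blank_maker_spec : Claim_equal_blank_maker := by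
  intro word _
  unfold Spec_blank_maker blank_maker blank_maker_alt
  rw [pv_foldl_acc, pv_key]
  simp
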